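-- pv_equiv track=rewrite | github.com/Mariapola/python_fundamentals | Mine.py | skyLineHeights
-- ===== SOURCE A (Python) =====
-- def skyLineHeights(arr):
--     ground = 0
--     seen = []
--     for i in arr:
--         if i > ground:
--             seen.append(i)
--             ground = i
--
--     return seen
-- ===== SOURCE B (Python) =====
-- from itertools import accumulate
--
-- def skyLineHeights(arr):
--     maxes = list(accumulate(arr, max, initial=0))
--     return [maxes[k] for k in range(1, len(maxes)) if maxes[k] > maxes[k - 1]]
-- ===== Notes on version B (the rewrite author's own statement) =====
-- stated objective: alternative
-- what changed: B first materializes the prefix-maxima table (accumulate with initial=0) and then, in a separate pass, emits the entries where the running maximum strictly increases, instead of A's single fused loop with a ground accumulator.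
import Mathlib
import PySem

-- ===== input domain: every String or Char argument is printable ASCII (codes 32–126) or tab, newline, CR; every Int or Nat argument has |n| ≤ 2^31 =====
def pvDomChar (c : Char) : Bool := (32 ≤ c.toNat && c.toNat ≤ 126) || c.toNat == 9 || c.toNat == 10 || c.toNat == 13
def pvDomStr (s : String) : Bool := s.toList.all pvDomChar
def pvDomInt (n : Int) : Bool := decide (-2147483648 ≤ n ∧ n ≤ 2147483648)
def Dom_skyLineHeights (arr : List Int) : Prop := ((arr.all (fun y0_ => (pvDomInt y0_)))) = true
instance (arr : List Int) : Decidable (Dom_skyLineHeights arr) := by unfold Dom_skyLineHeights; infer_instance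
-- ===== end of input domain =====

-- B builds the prefix-maxima table first and then filters the strict increases in a second pass,
-- instead of A's single fused loop; same return value, same O(n) cost.

-- ===== PORT A =====
-- A: one loop carrying ground and the seen list, appending i whenever i > ground.
def skyLineHeights (arr : List Int) : List Int :=
  (arr.foldl (fun (s : Int × List Int) i =>
      if i > s.1 then (i, s.2 ++ [i]) else s) (0, [])).2

-- ===== PORT B =====
-- second pass of Source B: walk adjacent pairs of the prefix-maxima table, emit on strict increase
def altJumps : List Int → List Int
  | a :: b :: rest => if b > a then b :: altJumps (b :: rest) else altJumps (b :: rest)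
  | _ => []

-- accumulate(arr, max, initial=0) is List.scanl max 0
def skyLineHeights_alt (arr : List Int) : List Int :=
  altJumps (List.scanl max 0 arr)

-- ===== PRECONDITION & SPEC =====
def Spec_skyLineHeights (arr : List Int) (out : List Int) : Prop := out = skyLineHeights_alt arr
instance (arr : List Int) (out : List Int) : Decidable (Spec_skyLineHeights arr out) := by unfold Spec_skyLineHeights; infer_instance

-- ===== CLAIM (what is proved, stated in full; the proofs are below) =====
def Claim_equal_skyLineHeights : Prop := ∀ (arr : List Int), Dom_skyLineHeights arr → Spec_skyLineHeights arr (skyLineHeights arr)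

-- ===== LEMMAS AND PROOFS =====

-- recursive characterisation of A's loop result (without the accumulator)
def jumpsFrom (g : Int) : List Int → List Int
  | [] => []
  | i :: rest => if i > g then i :: jumpsFrom i rest else jumpsFrom g rest

theorem foldA_eq (arr : List Int) : ∀ (g : Int) (acc : List Int),
    (arr.foldl (fun (s : Int × List Int) i =>
      if i > s.1 then (i, s.2 ++ [i]) else s) (g, acc)).2
    = acc ++ jumpsFrom g arr := by
  induction arr with
  | nil => intro g acc; simp [jumpsFrom]
  | cons i rest ih =>
    intro g acc
    by_cases h : i > g
    · simp [List.foldl, jumpsFrom, h, ih]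
    · simp [List.foldl, jumpsFrom, h, ih]

theorem jumps_eq_alt (arr : List Int) : ∀ (g : Int),
    jumpsFrom g arr = altJumps (List.scanl max g arr) := by
  induction arr with
  | nil => intro g; simp [jumpsFrom, altJumps, List.scanl]
  | cons i rest ih =>
    intro g
    rw [show List.scanl max g (i :: rest) = g :: List.scanl max (max g i) rest from
      List.scanl_cons ..]
    obtain ⟨t, ht⟩ : ∃ t, List.scanl max (max g i) rest = (max g i) :: t := by
      cases rest <;> simp [List.scanl]
    by_cases h : i > g
    · have hm : max g i = i := by omega
      rw [ht, hm]
      simp only [jumpsFrom, altJumps, if_pos h]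
      rw [← hm, ← ht, hm, ih]
    · have hm : max g i = g := by omega
      rw [ht, hm]
      have hng : ¬ g > g := lt_irrefl g
      simp only [jumpsFrom, altJumps, if_neg h, if_neg hng]
      rw [← hm, ← ht, hm, ih]

-- ===== VERDICT (by name: the statement is the Claim_ definition above) =====
theorem skyLineHeights_spec : Claim_equal_skyLineHeights := by
  intro arr _
  show skyLineHeights arr = skyLineHeights_alt arr
  unfold skyLineHeights skyLineHeights_alt
  rw [foldA_eq, jumps_eq_alt]
  rfl
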